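-- pv_equiv track=rewrite | github.com/Junyu-Jiang0508/Ukrainian_Poetry_Archive | src/utils/extract_poems_for_annotation.py | is_skip_sentence
-- ===== SOURCE A (Python) =====
-- def is_skip_sentence(s: str) -> bool:
--     s = str(s).strip()
--     if not s:
--         return True
--     if not any(c.isalnum() for c in s):
--         return True
--     if all(c.isdigit() or c in " .," for c in s) and any(c.isdigit() for c in s):
--         return True
--     return False
-- ===== SOURCE B (Python) =====
-- def _classify(c: str) -> str:
--     """Map a character to a one-letter class label."""
--     if c.isdigit():
--         return 'D'
--     if c.isalnum():
--         return 'A'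
--     if c in ' .,':
--         return 'S'
--     return 'X'
--
-- def is_skip_sentence(s: str) -> bool:
--     s = str(s).strip()
--     if not s:
--         return True
--     classes = {_classify(c) for c in s}
--     return classes.isdisjoint({'A', 'D'}) or ('D' in classes and classes <= {'D', 'S'})
-- ===== Notes on version B (the rewrite author's own statement) =====
-- stated objective: alternative
-- what changed: B classifies each character into a four-letter class alphabet {digit, other-alnum, separator, other}, collects the set of classes present with a set comprehension, and decides skipping by set algebra (disjointness from {A,D}, subset of {D,S}, membership of D) instead of A's three any/all character scans.
import Mathlib
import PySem

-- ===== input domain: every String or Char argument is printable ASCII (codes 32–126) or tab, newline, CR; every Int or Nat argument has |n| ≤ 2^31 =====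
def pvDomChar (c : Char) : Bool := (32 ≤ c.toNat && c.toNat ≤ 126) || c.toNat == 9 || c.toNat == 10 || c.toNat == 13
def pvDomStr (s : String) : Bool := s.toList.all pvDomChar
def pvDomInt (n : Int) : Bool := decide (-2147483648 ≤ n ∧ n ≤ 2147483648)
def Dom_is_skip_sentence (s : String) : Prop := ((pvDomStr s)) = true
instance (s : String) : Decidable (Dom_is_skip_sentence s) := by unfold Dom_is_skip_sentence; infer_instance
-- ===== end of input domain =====

-- B classifies characters into a class alphabet and decides by set algebra over the set of classes present (alternative decomposition, same cost).

-- ===== PORT A =====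
-- A: strip, then three sequential generator scans (any isalnum; all digit-or-sep && any digit).
def is_skip_sentence (s : String) : Bool :=
  let t := (PySem.Str.strip s).toList
  if t.isEmpty then true
  else if !(t.any PySem.Chars.isalnum) then true
  else if (t.all (fun c => PySem.Chars.isdigit c || c = ' ' || c = '.' || c = ','))
          && (t.any PySem.Chars.isdigit) then true
  else false

-- ===== PORT B =====
-- B: map each char to its class label, build the set of classes present, decide by set algebra.
def pvClassify (c : Char) : Char :=
  if PySem.Chars.isdigit c then 'D'
  else if PySem.Chars.isalnum c then 'A'
  else if c = ' ' || c = '.' || c = ',' then 'S'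
  else 'X'

def is_skip_sentence_alt (s : String) : Bool :=
  let t := (PySem.Str.strip s).toList
  if t.isEmpty then true
  else
    let classes : PySem.Set Char := PySem.Set.ofList (t.map pvClassify)
    PySem.Set.isdisjoint classes ['A', 'D'] ||
      (PySem.Set.contains classes 'D' && PySem.Set.issubset classes ['D', 'S'])

-- ===== PRECONDITION & SPEC =====
def Spec_is_skip_sentence (s : String) (out : Bool) : Prop := out = is_skip_sentence_alt s
instance (s : String) (out : Bool) : Decidable (Spec_is_skip_sentence s out) := by unfold Spec_is_skip_sentence; infer_instance

-- ===== CLAIM =====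
def Claim_equal_is_skip_sentence : Prop := ∀ (s : String), Dom_is_skip_sentence s → Spec_is_skip_sentence s (is_skip_sentence s)

-- ===== LEMMAS AND PROOFS =====

-- a digit character is alphanumeric
theorem pvDigit_alnum (c : Char) (h : PySem.Chars.isdigit c = true) : PySem.Chars.isalnum c = true := by
  simp [PySem.Chars.isalnum, PySem.Chars.isalpha, h]

theorem pvDisjoint_eq (t : List Char) :
    PySem.Set.isdisjoint (PySem.Set.ofList (t.map pvClassify)) ['A', 'D']
      = !(t.any PySem.Chars.isalnum) := by
  rw [Bool.eq_iff_iff, PySem.Set.isdisjoint_iff]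
  simp only [Bool.not_eq_true', List.any_eq_false]
  constructor
  · intro H c hc
    by_contra hal
    have hal' : PySem.Chars.isalnum c = true := by revert hal; cases PySem.Chars.isalnum c <;> simp
    by_cases hd : PySem.Chars.isdigit c = true
    · exact H 'D' (by simp [PySem.Set.mem_ofList, List.mem_map]; exact ⟨c, hc, by simp [pvClassify, hd]⟩) (by simp)
    · exact H 'A' (by simp [PySem.Set.mem_ofList, List.mem_map]; exact ⟨c, hc, by simp [pvClassify, hd, hal']⟩) (by simp)
  · intro H x hx
    simp only [PySem.Set.mem_ofList, List.mem_map] at hx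
    obtain ⟨c, hc, rfl⟩ := hx
    have := H c hc
    simp only [pvClassify]
    have hd : PySem.Chars.isdigit c = false := by
      cases hdd : PySem.Chars.isdigit c
      · rfl
      · exact absurd (pvDigit_alnum c hdd) (by simp [this])
    simp [hd, this]
    split <;> simp

theorem pvContains_eq (t : List Char) :
    PySem.Set.contains (PySem.Set.ofList (t.map pvClassify)) 'D' = t.any PySem.Chars.isdigit := by
  rw [Bool.eq_iff_iff]
  simp only [PySem.Set.contains_iff, PySem.Set.mem_ofList, List.mem_map, List.any_eq_true]
  constructor
  · rintro ⟨c, hc, hcls⟩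
    refine ⟨c, hc, ?_⟩
    by_contra hd
    have hd' : PySem.Chars.isdigit c = false := by revert hd; cases PySem.Chars.isdigit c <;> simp
    simp only [pvClassify, hd', Bool.false_eq_true, if_false] at hcls
    revert hcls
    split
    · decide
    · split
      · decide
      · decide
  · rintro ⟨c, hc, hd⟩
    exact ⟨c, hc, by simp [pvClassify, hd]⟩

theorem pvSubset_eq (t : List Char) :
    PySem.Set.issubset (PySem.Set.ofList (t.map pvClassify)) ['D', 'S']
      = t.all (fun c => PySem.Chars.isdigit c || c = ' ' || c = '.' || c = ',') := by
  rw [Bool.eq_iff_iff, PySem.Set.issubset_iff]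
  simp only [List.all_eq_true, PySem.Set.mem_ofList, List.mem_map]
  constructor
  · intro H c hc
    have hcls := H (pvClassify c) ⟨c, hc, rfl⟩
    by_cases hd : PySem.Chars.isdigit c = true
    · simp [hd]
    · have hd' : PySem.Chars.isdigit c = false := by revert hd; cases PySem.Chars.isdigit c <;> simp
      cases hal : PySem.Chars.isalnum c
      · cases hsep : (c = ' ' || c = '.' || c = ',')
        · simp [pvClassify, hd', hal, hsep] at hcls
        · simp only [Bool.or_eq_true, decide_eq_true_eq] at hsep
          rcases hsep with (h | h) | h <;> subst h <;> decide
      · simp [pvClassify, hd', hal] at hcls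
  · rintro H x ⟨c, hc, rfl⟩
    have hpc := H c hc
    by_cases hd : PySem.Chars.isdigit c = true
    · simp [pvClassify, hd]
    · have hd' : PySem.Chars.isdigit c = false := by revert hd; cases PySem.Chars.isdigit c <;> simp
      simp only [hd', Bool.false_or, Bool.or_eq_true, decide_eq_true_eq] at hpc
      rcases hpc with (h | h) | h <;> subst h <;> decide

-- ===== VERDICT =====
theorem is_skip_sentence_spec : Claim_equal_is_skip_sentence := by
  intro s _
  unfold Spec_is_skip_sentence is_skip_sentence is_skip_sentence_alt
  simp only [pvDisjoint_eq, pvContains_eq, pvSubset_eq]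
  cases (PySem.Str.strip s).toList.isEmpty <;>
    cases h₁ : (PySem.Str.strip s).toList.any PySem.Chars.isalnum <;>
    cases h₂ : (PySem.Str.strip s).toList.any PySem.Chars.isdigit <;>
    cases h₃ : (PySem.Str.strip s).toList.all (fun c => PySem.Chars.isdigit c || c = ' ' || c = '.' || c = ',') <;>
    simp [h₁, h₂, h₃]
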